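-- pv_equiv track=rewrite | github.com/jmsung/einstein | scripts/difference_bases/imperfect_5mark_search.py | compute_v
-- ===== SOURCE A (Python) =====
-- def compute_v(B) -> int:
--     """v(B) = largest L such that {1..L} ⊆ (B-B)⁺."""
--     diffs = set()
--     for i in range(len(B)):
--         for j in range(i):
--             d = B[i] - B[j]
--             if d > 0:
--                 diffs.add(d)
--     L = 0
--     while (L + 1) in diffs:
--         L += 1
--     return L
-- ===== SOURCE B (Python) =====
-- def compute_v(B) -> int:
--     """v(B) = largest L such that {1..L} ⊆ (B-B)⁺."""
--     def has_diff(t):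
--         seen = set()
--         for x in B:
--             if x - t in seen:
--                 return True
--             seen.add(x)
--         return False
--     L = 0
--     while has_diff(L + 1):
--         L += 1
--     return L
-- ===== Notes on version B (the rewrite author's own statement) =====
-- stated objective: alternative
-- what changed: B never materialises the set of pairwise differences: it probes each candidate difference L+1 on demand with a single scan that keeps a running set of earlier elements, stopping at the first missing difference.
import Mathlib
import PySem

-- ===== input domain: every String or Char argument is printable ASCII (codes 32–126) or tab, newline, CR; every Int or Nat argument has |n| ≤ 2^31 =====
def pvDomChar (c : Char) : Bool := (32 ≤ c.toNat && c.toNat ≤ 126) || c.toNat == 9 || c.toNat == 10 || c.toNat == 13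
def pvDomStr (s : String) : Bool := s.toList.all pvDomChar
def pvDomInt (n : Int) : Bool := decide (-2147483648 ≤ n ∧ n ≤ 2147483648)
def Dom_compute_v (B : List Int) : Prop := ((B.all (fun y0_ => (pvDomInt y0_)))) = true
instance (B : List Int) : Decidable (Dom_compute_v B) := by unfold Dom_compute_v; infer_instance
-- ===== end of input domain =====

-- B is an alternative of the same cost class: it probes each candidate difference on demand
-- with a running set of earlier elements instead of materialising every pairwise difference.

-- Shared while-loop skeleton (both Pythons run 'L = 0; while guard(L+1): L += 1; return L');
-- the fuel bounds the recursion and is sufficient: every positive pairwise difference is ≤ 2·max|B|.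
def pvWhile (g : Int → Bool) : Nat → Int → Int
  | 0, L => L
  | f + 1, L => if g (L + 1) then pvWhile g f (L + 1) else L

def pvFuel (B : List Int) : Nat := 2 * B.foldl (fun a x => max a x.natAbs) 0 + 2

-- ===== PORT A =====
def pvDiffsA (B : List Int) : PySem.Set Int :=
  (List.range B.length).foldl (fun diffs i =>
    (List.range i).foldl (fun diffs j =>
      let d := B.getD i 0 - B.getD j 0
      if d > 0 then PySem.Set.add diffs d else diffs) diffs) PySem.Set.empty

def compute_v (B : List Int) : Int :=
  pvWhile (fun t => PySem.Set.contains (pvDiffsA B) t) (pvFuel B) 0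

-- ===== PORT B =====
def pvProbeAux (t : Int) (seen : PySem.Set Int) : List Int → Bool
  | [] => false
  | x :: xs =>
      if PySem.Set.contains seen (x - t) then true
      else pvProbeAux t (PySem.Set.add seen x) xs

def compute_v_alt (B : List Int) : Int :=
  pvWhile (fun t => pvProbeAux t PySem.Set.empty B) (pvFuel B) 0

-- ===== PRECONDITION & SPEC =====
def Spec_compute_v (B : List Int) (out : Int) : Prop := out = compute_v_alt B
instance (B : List Int) (out : Int) : Decidable (Spec_compute_v B out) := by unfold Spec_compute_v; infer_instance

-- ===== CLAIM (what is proved, stated in full; the proofs are below) =====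
def Claim_equal_compute_v : Prop := ∀ (B : List Int), Dom_compute_v B → Spec_compute_v B (compute_v B)

-- ===== LEMMAS AND PROOFS =====

-- The while loop only depends on the guard's values at positive arguments.
theorem pvWhile_congr (g g' : Int → Bool) (h : ∀ t, 0 < t → g t = g' t) :
    ∀ f L, 0 ≤ L → pvWhile g f L = pvWhile g' f L := by
  intro f
  induction f with
  | zero => intro L _; rfl
  | succ f ih =>
      intro L hL
      simp only [pvWhile, h (L + 1) (by omega)]
      split
      · exact ih (L + 1) (by omega)
      · rfl

-- membership in the inner fold of port A's diff build
theorem mem_inner_fold (B : List Int) (i : Nat) (y : Int) :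
    ∀ (l : List Nat) (s : PySem.Set Int),
      y ∈ l.foldl (fun diffs j =>
        let d := B.getD i 0 - B.getD j 0
        if d > 0 then PySem.Set.add diffs d else diffs) s ↔
      y ∈ s ∨ ∃ j ∈ l, B.getD i 0 - B.getD j 0 = y ∧ 0 < y := by
  intro l
  induction l with
  | nil => simp
  | cons j l ih =>
      intro s
      simp only [List.foldl_cons, ih]
      by_cases hd : B.getD i 0 - B.getD j 0 > 0
      · simp only [hd, if_pos, PySem.Set.mem_add, List.mem_cons]
        constructor
        · rintro ((hs | hy) | h)
          · exact Or.inl hs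
          · exact Or.inr ⟨j, Or.inl rfl, hy.symm, by omega⟩
          · obtain ⟨j', hj', hj2⟩ := h; exact Or.inr ⟨j', Or.inr hj', hj2⟩
        · rintro (hs | ⟨j', (rfl | hj'), hj2, hy⟩)
          · exact Or.inl (Or.inl hs)
          · exact Or.inl (Or.inr hj2.symm)
          · exact Or.inr ⟨j', hj', hj2, hy⟩
      · simp only [hd, List.mem_cons]
        constructor
        · rintro (hs | h)
          · exact Or.inl hs
          · obtain ⟨j', hj', hj2⟩ := h; exact Or.inr ⟨j', Or.inr hj', hj2⟩
        · rintro (hs | ⟨j', (rfl | hj'), hj2, hy⟩)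
          · exact Or.inl hs
          · omega
          · exact Or.inr ⟨j', hj', hj2, hy⟩


-- characterisation of port A's difference set
theorem mem_diffsA (B : List Int) (y : Int) :
    y ∈ pvDiffsA B ↔
      ∃ i < B.length, ∃ j < i, B.getD i 0 - B.getD j 0 = y ∧ 0 < y := by
  have key : ∀ n : Nat,
      (y ∈ (List.range n).foldl (fun diffs i =>
        (List.range i).foldl (fun diffs j =>
          let d := B.getD i 0 - B.getD j 0
          if d > 0 then PySem.Set.add diffs d else diffs) diffs) PySem.Set.empty) ↔
      ∃ i < n, ∃ j < i, B.getD i 0 - B.getD j 0 = y ∧ 0 < y := by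
    intro n
    induction n with
    | zero => simp [PySem.Set.empty]
    | succ n ih =>
        rw [List.range_succ, List.foldl_append, List.foldl_cons, List.foldl_nil,
          mem_inner_fold, ih]
        constructor
        · rintro (⟨i, hi, h⟩ | ⟨j, hj, h⟩)
          · exact ⟨i, by omega, h⟩
          · exact ⟨n, by omega, j, List.mem_range.mp hj, h⟩
        · rintro ⟨i, hi, j, hj, h⟩
          by_cases hin : i < n
          · exact Or.inl ⟨i, hin, j, hj, h⟩
          · have : i = n := by omega
            subst this
            exact Or.inr ⟨j, List.mem_range.mpr hj, h⟩
  exact key B.length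

-- characterisation of port B's probe
theorem probeAux_iff (t : Int) :
    ∀ (xs : List Int) (seen : PySem.Set Int),
      pvProbeAux t seen xs = true ↔
        ∃ k < xs.length, (xs.getD k 0 - t ∈ seen ∨ xs.getD k 0 - t ∈ xs.take k) := by
  intro xs
  induction xs with
  | nil => simp [pvProbeAux]
  | cons x xs ih =>
      intro seen
      simp only [pvProbeAux]
      by_cases hx : (x - t) ∈ seen
      · rw [if_pos (by simpa using (PySem.Set.contains_iff seen (x - t)).mpr hx)]
        constructor
        · intro _; exact ⟨0, by simp, Or.inl (by simpa using hx)⟩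
        · intro _; rfl
      · rw [if_neg (by simpa using hx), ih]
        constructor
        · rintro ⟨k, hk, h⟩
          refine ⟨k + 1, by simpa using Nat.succ_lt_succ hk, ?_⟩
          rcases h with h | h
          · rw [PySem.Set.mem_add] at h
            rcases h with h | h
            · exact Or.inl (by simpa using h)
            · exact Or.inr (by
                simp only [List.getD_cons_succ, List.take_succ_cons, List.mem_cons]
                exact Or.inl h)
          · exact Or.inr (by simp only [List.getD_cons_succ, List.take_succ_cons, List.mem_cons]; right; simpa using h)
        · rintro ⟨k, hk, h⟩
          match k, hk with
          | 0, _ =>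
              simp only [List.getD_cons_zero, List.take_zero] at h
              rcases h with h | h
              · exact absurd h hx
              · simp at h
          | k + 1, hk =>
              refine ⟨k, by simp only [List.length_cons] at hk; omega, ?_⟩
              simp only [List.getD_cons_succ, List.take_succ_cons, List.mem_cons] at h
              rcases h with h | h | h
              · exact Or.inl (by rw [PySem.Set.mem_add]; exact Or.inl h)
              · exact Or.inl (by rw [PySem.Set.mem_add]; exact Or.inr h)
              · exact Or.inr h

-- value in a take-prefix, in getD form
theorem mem_take_iff_getD (xs : List Int) (k : Nat) (v : Int) (hk : k ≤ xs.length) :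
    v ∈ xs.take k ↔ ∃ j < k, xs.getD j 0 = v := by
  rw [List.mem_take_iff_getElem]
  constructor
  · rintro ⟨j, hj, hv⟩
    have hjk : j < k := by omega
    have hjl : j < xs.length := by omega
    refine ⟨j, hjk, ?_⟩
    rw [List.getD_eq_getElem?_getD, List.getElem?_eq_getElem hjl]
    simpa using hv
  · rintro ⟨j, hjk, hv⟩
    have hjl : j < xs.length := by omega
    rw [List.getD_eq_getElem?_getD, List.getElem?_eq_getElem hjl] at hv
    exact ⟨j, by omega, by simpa using hv⟩

-- the two guards agree on every positive candidate difference
theorem guards_agree (B : List Int) (t : Int) (ht : 0 < t) :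
    PySem.Set.contains (pvDiffsA B) t = pvProbeAux t PySem.Set.empty B := by
  rw [Bool.eq_iff_iff, PySem.Set.contains_iff (pvDiffsA B) t, mem_diffsA, probeAux_iff]
  constructor
  · rintro ⟨i, hi, j, hj, heq, _⟩
    refine ⟨i, hi, Or.inr ?_⟩
    rw [mem_take_iff_getD _ _ _ (by omega)]
    exact ⟨j, hj, by omega⟩
  · rintro ⟨k, hk, h⟩
    rcases h with h | h
    · simp [PySem.Set.empty] at h
    · rw [mem_take_iff_getD _ _ _ (by omega)] at h
      obtain ⟨j, hj, hv⟩ := h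
      exact ⟨k, hk, j, hj, by omega, ht⟩

-- ===== VERDICT (by name: the statement is the Claim_ definition above) =====
theorem compute_v_spec : Claim_equal_compute_v := by
  intro B _
  unfold Spec_compute_v compute_v compute_v_alt
  exact pvWhile_congr _ _ (guards_agree B) (pvFuel B) 0 le_rfl
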